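-- pv_equiv track=rewrite | github.com/shahidul2k9/problem-solution | leetcode/2268. Minimum Number of Keypresses.py | minimumKeypresses
-- ===== SOURCE A (Python) =====
-- from collections import Counter
--
-- def minimumKeypresses(s: str) -> int:
--     frequency = Counter(s)
--     press_count = 0
--     index = 0
--     for ch, f in sorted(frequency.items(), key=lambda x: x[1], reverse=True):
--         press = 1 if index < 9 else (2 if index < 18 else 3)
--         press_count += f * press
--         index += 1
--     return press_count
-- ===== SOURCE B (Python) =====
-- from collections import Counter
--
-- def minimumKeypresses(s: str) -> int:
--     # Complement view: every press costs at most 3; the 18 most frequent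
--     # characters get a discount (2 per occurrence for the top 9, 1 for the
--     # next 9).  Select them by repeated max-extraction -- no sort needed.
--     vals = list(Counter(s).values())
--     ans = 3 * sum(vals)
--     for k in range(18):
--         if not vals:
--             break
--         m = max(vals)
--         vals.remove(m)
--         ans -= 2 * m if k < 9 else m
--     return ans
-- ===== Notes on version B (the rewrite author's own statement) =====
-- stated objective: alternative
-- what changed: Replaces A's full sort of (char, count) items and index-counter 1/2/3 loop by a sort-free complement scheme: charge 3 keypresses per occurrence, then extract the 18 largest counts by repeated max-removal and subtract their discounts (2 per occurrence for the top 9, 1 for the next 9).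
import Mathlib
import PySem

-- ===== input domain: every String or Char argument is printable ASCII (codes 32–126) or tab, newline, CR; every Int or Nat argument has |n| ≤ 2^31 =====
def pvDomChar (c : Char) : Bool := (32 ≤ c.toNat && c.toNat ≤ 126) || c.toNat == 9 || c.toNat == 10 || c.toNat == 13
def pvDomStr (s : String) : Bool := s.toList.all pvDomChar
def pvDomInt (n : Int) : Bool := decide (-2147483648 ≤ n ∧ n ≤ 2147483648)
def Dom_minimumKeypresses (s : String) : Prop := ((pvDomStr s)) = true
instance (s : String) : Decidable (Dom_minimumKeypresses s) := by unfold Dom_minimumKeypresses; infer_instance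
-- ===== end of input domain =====

-- B replaces A's sort of the (char, count) items plus index-counter loop by a sort-free
-- complement scheme: charge 3 per occurrence, then extract the 18 largest counts by
-- repeated max-removal and subtract their discounts (objective: alternative).

-- ===== PORT A =====
def minimumKeypresses (s : String) : Int :=
  let frequency := PySem.Dict.counter s.toList
  let st := (PySem.List.sorted frequency.items (fun x => x.2) true).foldl
    (fun (st : Int × Int) p =>
      let press : Int := if st.2 < 9 then 1 else if st.2 < 18 then 2 else 3
      (st.1 + p.2 * press, st.2 + 1)) (0, 0)
  st.1

-- ===== PORT B =====
-- the loop body: 'if not vals: break' is modeled by leaving the state unchanged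
-- (exact: the body has no other effect, so breaking equals skipping the rest)
def pvStepB (st : List Int × Int) (k : Int) : List Int × Int :=
  match PySem.List.max? st.1 (fun x => x) with
  | none => st
  | some m => ((PySem.List.remove? st.1 m).getD st.1,
               st.2 - (if k < 9 then 2 * m else m))

def minimumKeypresses_alt (s : String) : Int :=
  let vals := (PySem.Dict.counter s.toList).values
  let st := (PySem.List.pyRange 0 18 1).foldl pvStepB (vals, 3 * vals.sum)
  st.2

-- ===== PRECONDITION & SPEC =====
def Spec_minimumKeypresses (s : String) (out : Int) : Prop := out = minimumKeypresses_alt s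
instance (s : String) (out : Int) : Decidable (Spec_minimumKeypresses s out) := by unfold Spec_minimumKeypresses; infer_instance

-- ===== CLAIM (what is proved, stated in full; the proofs are below) =====
def Claim_equal_minimumKeypresses : Prop := ∀ (s : String), Dom_minimumKeypresses s → Spec_minimumKeypresses s (minimumKeypresses s)

-- ===== LEMMAS AND PROOFS =====

/-- Weighted sum of `l` where position `i + j` gets weight 1/2/3 (A's `press`). -/
def wsum (i : Nat) : List Int → Int
  | [] => 0
  | f :: t => f * (if i < 9 then 1 else if i < 18 then 2 else 3) + wsum (i + 1) t

theorem foldA (l : List (Char × Int)) (pc : Int) (i : Nat) :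
    (l.foldl (fun (st : Int × Int) p =>
      (st.1 + p.2 * (if st.2 < 9 then 1 else if st.2 < 18 then 2 else 3), st.2 + 1))
      (pc, (i : Int))).1 = pc + wsum i (l.map (fun p => p.2)) := by
  induction l generalizing pc i with
  | nil => simp [wsum]
  | cons p t ih =>
    have h9 : ((i : Int) < 9) = (i < 9) := by simp
    have h18 : ((i : Int) < 18) = (i < 18) := by simp
    have : ((i : Int) + 1) = ((i + 1 : Nat) : Int) := by push_cast; ring
    simp only [List.foldl_cons, List.map_cons, wsum, h9, h18, this, ih]
    ring

theorem wsum_seg (l : List Int) (i : Nat) :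
    wsum i l = (l.take (9 - i)).sum + 2 * ((l.drop (9 - i)).take (18 - i - (9 - i))).sum
      + 3 * (l.drop (18 - i)).sum := by
  induction l generalizing i with
  | nil => simp [wsum]
  | cons f t ih =>
    rcases Nat.lt_or_ge i 9 with h | h
    · have em : 18 - i - (9 - i) = 18 - (i + 1) - (9 - (i + 1)) := by omega
      have e9 : 9 - i = 9 - (i + 1) + 1 := by omega
      have e18 : 18 - i = 18 - (i + 1) + 1 := by omega
      rw [wsum, if_pos h, ih, em, e9, e18, List.take_succ_cons, List.drop_succ_cons,
        List.drop_succ_cons, List.sum_cons]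
      ring
    · rcases Nat.lt_or_ge i 18 with h' | h'
      · have em : 18 - i - (9 - i) = 18 - (i + 1) - (9 - (i + 1)) + 1 := by omega
        have e9 : 9 - i = 0 := by omega
        have e9' : 9 - (i + 1) = 0 := by omega
        have e18 : 18 - i = 18 - (i + 1) + 1 := by omega
        rw [wsum, if_neg (by omega : ¬ i < 9), if_pos h', ih, em, e9, e9', e18,
          List.drop_zero, List.drop_zero, List.take_zero, List.take_zero,
          List.take_succ_cons, List.drop_succ_cons, List.sum_cons, List.sum_nil]
        ring
      · have e9 : 9 - i = 0 := by omega
        have e9' : 9 - (i + 1) = 0 := by omega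
        have e18 : 18 - i = 0 := by omega
        have e18' : 18 - (i + 1) = 0 := by omega
        simp only [wsum, if_neg (by omega : ¬ i < 9), if_neg (by omega : ¬ i < 18), ih,
          e9, e9', e18, e18', Nat.sub_self, List.take_zero, List.drop_zero,
          List.sum_nil, List.sum_cons]
        ring

/-- The values of A's sorted items list are the descending-sorted values list. -/
theorem sorted_items_values (d : PySem.Dict Char Int) :
    (PySem.List.sorted d.items (fun x => x.2) true).map (fun p => p.2)
      = PySem.List.sorted d.values (fun x => x) true := by
  exact List.Perm.eq_of_pairwise (le := fun a b => b ≤ a)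
    (fun a b _ _ h1 h2 => le_antisymm h2 h1)
    ((PySem.List.sorted_pairwise_rev d.items (fun x => x.2)).map _ (fun _ _ h => h))
    (PySem.List.sorted_pairwise_rev d.values (fun x => x))
    (((PySem.List.sorted_perm d.items (fun x => x.2) true).map _).trans
      ((PySem.List.sorted_perm d.values (fun x => x) true).symm))

/-- Removing the max from the front of the descending sort. -/
theorem sorted_rev_max_cons (vals : List Int) (m : Int)
    (h : PySem.List.max? vals (fun x => x) = some m) :
    PySem.List.sorted vals (fun x => x) true
      = m :: PySem.List.sorted (vals.erase m) (fun x => x) true := by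
  have hm : m ∈ vals := PySem.List.max?_mem h
  refine List.Perm.eq_of_pairwise (le := fun a b => b ≤ a)
    (fun a b _ _ h1 h2 => le_antisymm h2 h1)
    (PySem.List.sorted_pairwise_rev vals (fun x => x))
    (List.Pairwise.cons ?_ (PySem.List.sorted_pairwise_rev (vals.erase m) (fun x => x)))
    ?_
  · intro y hy
    exact PySem.List.max?_isMax h y (List.mem_of_mem_erase ((PySem.List.mem_sorted _ _ _ _).1 hy))
  · exact ((PySem.List.sorted_perm vals (fun x => x) true).trans
      (List.perm_cons_erase hm)).trans
      (List.Perm.cons m (PySem.List.sorted_perm (vals.erase m) (fun x => x) true).symm)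

/-- B's loop, characterised through the descending sort of the current values. -/
theorem loopB (n : Nat) : ∀ (k : Nat) (vals : List Int) (ans : Int), 18 ≤ k + n →
    ((PySem.List.pyRange (k : Int) 18 1).foldl pvStepB (vals, ans)).2
      = ans - 2 * ((PySem.List.sorted vals (fun x => x) true).take (9 - k)).sum
          - (((PySem.List.sorted vals (fun x => x) true).drop (9 - k)).take
              (18 - k - (9 - k))).sum := by
  induction n with
  | zero =>
    intro k vals ans hk
    have e : 9 - k = 0 := by omega
    rw [PySem.List.pyRange_one_eq_nil (by exact_mod_cast by omega : (18:Int) ≤ (k:Int)),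
      e]
    simp [(by omega : 18 - k - 0 = 0)]
  | succ n ih =>
    intro k vals ans hk
    rcases Nat.lt_or_ge k 18 with hlt | hge
    · rw [PySem.List.pyRange_one_cons (by exact_mod_cast hlt : (k:Int) < 18)]
      rw [List.foldl_cons]
      rcases hmax : PySem.List.max? vals (fun x => x) with _ | m
      · -- vals = []: break; remaining iterations leave the state unchanged
        have hnil : vals = [] := (PySem.List.max?_eq_none_iff _ _).1 hmax
        have : ((k : Int) + 1) = ((k + 1 : Nat) : Int) := by push_cast; ring
        rw [show pvStepB (vals, ans) (k : Int) = (vals, ans) by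
            simp [pvStepB, hmax], this, ih (k + 1) vals ans (by omega)]
        simp [hnil, PySem.List.sorted]
      · have hm : m ∈ vals := PySem.List.max?_mem hmax
        have hrm : PySem.List.remove? vals m = some (vals.erase m) :=
          PySem.List.remove?_eq_some_erase vals m hm
        have hD := sorted_rev_max_cons vals m hmax
        have hcast : ((k : Int) + 1) = ((k + 1 : Nat) : Int) := by push_cast; ring
        have hstep : pvStepB (vals, ans) (k : Int)
            = (vals.erase m, ans - (if (k : Int) < 9 then 2 * m else m)) := by
          simp [pvStepB, hmax, hrm]
        rw [hstep, hcast, ih (k + 1) (vals.erase m) _ (by omega), hD]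
        rcases Nat.lt_or_ge k 9 with h | h
        · have e9 : 9 - k = 9 - (k + 1) + 1 := by omega
          have em : 18 - k - (9 - k) = 18 - (k + 1) - (9 - (k + 1)) := by omega
          rw [if_pos (by exact_mod_cast h : (k : Int) < 9), em, e9,
            List.take_succ_cons, List.drop_succ_cons, List.sum_cons]
          ring
        · have e9 : 9 - k = 0 := by omega
          have e9' : 9 - (k + 1) = 0 := by omega
          have em : 18 - k - (9 - k) = 18 - (k + 1) - (9 - (k + 1)) + 1 := by omega
          rw [if_neg (by exact_mod_cast Nat.not_lt.2 h : ¬ (k : Int) < 9), em, e9, e9']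
          simp only [List.take_zero, List.drop_zero, List.sum_nil,
            List.take_succ_cons, List.sum_cons]
          ring
    · have e : 9 - k = 0 := by omega
      rw [PySem.List.pyRange_one_eq_nil (by exact_mod_cast hge : (18:Int) ≤ (k:Int)), e]
      simp [(by omega : 18 - k - 0 = 0)]

-- ===== VERDICT (by name: the statement is the Claim_ definition above) =====
theorem minimumKeypresses_spec : Claim_equal_minimumKeypresses := by
  intro s _
  unfold Spec_minimumKeypresses minimumKeypresses minimumKeypresses_alt
  have hA := foldA (PySem.List.sorted (PySem.Dict.counter s.toList).items (fun x => x.2) true) 0 0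
  simp only [Nat.cast_zero] at hA
  have hB := loopB 18 0 (PySem.Dict.counter s.toList).values
    (3 * (PySem.Dict.counter s.toList).values.sum) (by omega)
  simp only [Nat.cast_zero, Nat.sub_zero] at hB
  rw [hA, sorted_items_values, wsum_seg, hB]
  set D := PySem.List.sorted (PySem.Dict.counter s.toList).values (fun x => x) true with hDdef
  have hsum : D.sum = (PySem.Dict.counter s.toList).values.sum :=
    (PySem.List.sorted_perm _ _ _).sum_eq
  have hsplit : D.sum = (D.take 9).sum + ((D.drop 9).take 9).sum + (D.drop 18).sum := by
    conv_lhs => rw [← List.take_append_drop 9 D]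
    rw [List.sum_append]
    conv_lhs => rw [← List.take_append_drop 9 (D.drop 9)]
    rw [List.sum_append, List.drop_drop]
    ring_nf
  simp only [Nat.sub_zero] at *
  have : (18 - 9 : Nat) = 9 := by omega
  rw [this] at *
  omega
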